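-- pv_equiv track=rewrite | github.com/eduardocerqueira/seeker | seeker/snippet/dnf-set-metalink-params.py | set_urlencoded_qs_values
-- ===== SOURCE A (Python) =====
-- from typing import Dict, FrozenSet, Iterable, List, Optional, OrderedDict, Tuple
--
-- def set_urlencoded_qs_values(
--     query: str, key: str, values: Iterable[Optional[str]]
-- ) -> str:
--     if query:
--         items = query.split("&")
--     else:
--         items = []
--
--     i = 0
--
--     for value in values:
--         pair = key + "=" + value if value is not None else key
--         while True:
--             if i == len(items):
--                 items.append(pair)
--                 i += 1
--                 break
--             elif items[i].split("=", 1)[0] == key: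
--                 items[i] = pair
--                 i += 1
--                 break
--
--             i += 1
--
--     while i < len(items):
--         if items[i].split("=", 1)[0] == key:
--             del items[i]
--         else:
--             i += 1
--
--     return "&".join(items)
-- ===== SOURCE B (Python) =====
-- def set_urlencoded_qs_values(query, key, values):
--     items = query.split("&") if query else []
--     it = iter(values)
--     _S = object()
--     out = []
--     for item in items:
--         if item.split("=", 1)[0] == key:
--             v = next(it, _S)
--             if v is _S:
--                 continue
--             out.append(key + "=" + v if v is not None else key)
--         else:
--             out.append(item)
--     for v in it:
--         out.append(key + "=" + v if v is not None else key)
--     return "&".join(out)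
-- ===== Notes on version B (the rewrite author's own statement) =====
-- stated objective: simpler
-- what changed: Replaced A's index-juggling in-place rewrite (an inner while loop rescanning a mutated list per value, plus a trailing deletion pass) by one left-to-right pass over the items that pairs each key-item with the next value from an iterator (dropping it when values run out) and appends leftover values at the end.
import Mathlib
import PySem

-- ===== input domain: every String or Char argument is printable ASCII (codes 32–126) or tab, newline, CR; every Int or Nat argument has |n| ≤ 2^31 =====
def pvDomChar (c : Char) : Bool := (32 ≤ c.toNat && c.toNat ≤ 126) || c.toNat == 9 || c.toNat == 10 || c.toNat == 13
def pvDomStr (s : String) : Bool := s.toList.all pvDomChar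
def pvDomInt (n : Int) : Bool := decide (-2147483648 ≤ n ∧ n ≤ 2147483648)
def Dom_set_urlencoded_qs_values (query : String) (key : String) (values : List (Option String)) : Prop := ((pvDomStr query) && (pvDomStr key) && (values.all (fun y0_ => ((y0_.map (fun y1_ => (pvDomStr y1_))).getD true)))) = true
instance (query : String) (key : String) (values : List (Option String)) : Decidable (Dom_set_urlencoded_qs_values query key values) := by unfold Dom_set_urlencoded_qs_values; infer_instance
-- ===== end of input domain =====

-- B replaces A's index-juggling in-place rewrite (inner while over a mutated list plus a
-- trailing deletion pass) by a single left-to-right pass pairing key-items with an iterator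
-- of values; objective: simpler. Equivalence is on the return value (A mutates only locals).

-- item.split("=", 1)[0]  ("=" is nonempty, so splitMax? returns some nonempty list)
def pvKeyOf (item : String) : String :=
  ((PySem.Str.splitMax? item "=" 1).getD []).getD 0 ""

-- key + "=" + value if value is not None else key
def pvPairOf (key : String) (v : Option String) : String :=
  match v with
  | some s => key ++ "=" ++ s
  | none => key

-- ===== PORT A =====
-- the inner 'while True' loop of A: scan forward from i; append at the end, or replace
-- the first item whose key matches.  (Python tests i == len(items) first; on every reachable
-- state i ≤ len(items), so the guard i < items.length is the same test.)
def pvInnerA (key : String) (items : List String) (i : Nat) (pair : String) :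
    List String × Nat :=
  if h : i < items.length then
    if pvKeyOf items[i] == key then (items.set i pair, i + 1)
    else pvInnerA key items (i + 1) pair
  else (items ++ [pair], i + 1)
termination_by items.length - i

-- the trailing 'while i < len(items)' loop of A: delete remaining matching items
def pvDelA (key : String) (items : List String) (i : Nat) : List String :=
  if h : i < items.length then
    if pvKeyOf items[i] == key then pvDelA key (items.eraseIdx i) i
    else pvDelA key items (i + 1)
  else items
termination_by items.length - i
decreasing_by
  · have := List.length_eraseIdx_of_lt h; omega
  · omega

def set_urlencoded_qs_values (query : String) (key : String) (values : List (Option String)) : String :=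
  let items := if query = "" then [] else (PySem.Str.split? query "&").getD []
  let s := values.foldl (fun (s : List String × Nat) v => pvInnerA key s.1 s.2 (pvPairOf key v)) (items, 0)
  PySem.Str.join "&" (pvDelA key s.1 s.2)

-- ===== PORT B =====
-- B's two loops: walk items once, pairing each matching item with the next value (dropping
-- it if values ran out); when items are exhausted, the remaining values become fresh pairs.
def pvScanB (key : String) (items : List String) (vs : List (Option String)) : List String :=
  match items with
  | [] => vs.map (pvPairOf key)
  | x :: xs =>
    if pvKeyOf x == key then
      match vs with
      | [] => pvScanB key xs []
      | v :: rest => pvPairOf key v :: pvScanB key xs rest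
    else x :: pvScanB key xs vs

def set_urlencoded_qs_values_alt (query : String) (key : String) (values : List (Option String)) : String :=
  let items := if query = "" then [] else (PySem.Str.split? query "&").getD []
  PySem.Str.join "&" (pvScanB key items values)

-- ===== PRECONDITION & SPEC =====
def Spec_set_urlencoded_qs_values (query : String) (key : String) (values : List (Option String)) (out : String) : Prop := out = set_urlencoded_qs_values_alt query key values
instance (query : String) (key : String) (values : List (Option String)) (out : String) : Decidable (Spec_set_urlencoded_qs_values query key values out) := by unfold Spec_set_urlencoded_qs_values; infer_instance

-- ===== CLAIM (what is proved, stated in full; the proofs are below) =====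
def Claim_equal_set_urlencoded_qs_values : Prop := ∀ (query : String) (key : String) (values : List (Option String)), Dom_set_urlencoded_qs_values query key values → Spec_set_urlencoded_qs_values query key values (set_urlencoded_qs_values query key values)

-- ===== LEMMAS AND PROOFS =====

-- with the scan index at the very end, each value is appended as a fresh pair
theorem pvFoldl_at_end (key : String) (vs : List (Option String)) (out : List String) :
    vs.foldl (fun (s : List String × Nat) v => pvInnerA key s.1 s.2 (pvPairOf key v)) (out, out.length)
      = (out ++ vs.map (pvPairOf key), (out ++ vs.map (pvPairOf key)).length) := by
  induction vs generalizing out with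
  | nil => simp
  | cons v rest ih =>
    have h1 : pvInnerA key out out.length (pvPairOf key v)
        = (out ++ [pvPairOf key v], out.length + 1) := by
      rw [pvInnerA]; simp
    simp only [List.foldl_cons, h1]
    have h2 : out.length + 1 = (out ++ [pvPairOf key v]).length := by simp
    rw [h2, ih (out ++ [pvPairOf key v])]
    simp

-- the trailing deletion pass never touches the already-scanned prefix; it is a filter on the tail
theorem pvDelA_append (key : String) (tail out : List String) :
    pvDelA key (out ++ tail) out.length
      = out ++ tail.filter (fun x => !(pvKeyOf x == key)) := by
  induction tail generalizing out with
  | nil => rw [pvDelA]; simp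
  | cons x xs ih =>
    have hlt : out.length < (out ++ x :: xs).length := by simp
    have hget : (out ++ x :: xs)[out.length] = x := by
      simp [List.getElem_append_right]
    rw [pvDelA]
    simp only [hlt, dif_pos, hget]
    by_cases hk : pvKeyOf x == key
    · have herase : (out ++ x :: xs).eraseIdx out.length = out ++ xs := by
        rw [List.eraseIdx_append_of_length_le (by omega)]
        simp
      simp only [hk, if_pos, herase, ih out]
      simp [hk]
    · have h1 : out ++ x :: xs = (out ++ [x]) ++ xs := by simp
      have h2 : out.length + 1 = (out ++ [x]).length := by simp
      simp only [hk, if_neg, Bool.not_eq_true]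
      rw [show (pvDelA key (out ++ x :: xs) (out.length + 1)
            = pvDelA key ((out ++ [x]) ++ xs) (out ++ [x]).length) from by rw [← h1, ← h2],
          ih (out ++ [x])]
      simp [hk]

-- one inner-loop call, starting just before a non-matching item: the item is skipped
theorem pvInnerA_skip (key : String) (x : String) (xs out : List String) (pair : String)
    (hk : ¬ (pvKeyOf x == key) = true) :
    pvInnerA key (out ++ x :: xs) out.length pair
      = pvInnerA key ((out ++ [x]) ++ xs) (out ++ [x]).length pair := by
  have hlt : out.length < (out ++ x :: xs).length := by simp
  have hget : (out ++ x :: xs)[out.length] = x := by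
    simp [List.getElem_append_right]
  rw [pvInnerA]
  simp only [hlt, dif_pos, hget, hk, if_neg, Bool.not_eq_true]
  have h1 : out ++ x :: xs = (out ++ [x]) ++ xs := by simp
  have h2 : out.length + 1 = (out ++ [x]).length := by simp
  rw [show (pvInnerA key (out ++ x :: xs) (out.length + 1) pair
        = pvInnerA key ((out ++ [x]) ++ xs) (out ++ [x]).length pair) from by rw [← h1, ← h2]]

-- one inner-loop call, starting at a matching item: the item is replaced in place
theorem pvInnerA_hit (key : String) (x : String) (xs out : List String) (pair : String)
    (hk : (pvKeyOf x == key) = true) :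
    pvInnerA key (out ++ x :: xs) out.length pair
      = ((out ++ [pair]) ++ xs, (out ++ [pair]).length) := by
  have hlt : out.length < (out ++ x :: xs).length := by simp
  have hget : (out ++ x :: xs)[out.length] = x := by
    simp [List.getElem_append_right]
  rw [pvInnerA]
  simp only [hlt, dif_pos, hget, hk, if_pos]
  have hset : (out ++ x :: xs).set out.length pair = out ++ [pair] ++ xs := by
    rw [List.set_append_right _ _ (by omega)]
    simp
  rw [hset]
  simp

-- with no values left, B's pass is the same filter as A's deletion pass
theorem pvScanB_nil (key : String) (xs : List String) :
    pvScanB key xs [] = xs.filter (fun x => !(pvKeyOf x == key)) := by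
  induction xs with
  | nil => simp [pvScanB]
  | cons x xs ih =>
    by_cases hk : (pvKeyOf x == key) = true
    · simp [pvScanB, hk, ih]
    · simp [pvScanB, hk, ih]

-- main simulation: A's whole pipeline, started with scan index at |out| on items = out ++ tail,
-- produces out ++ (B's single pass over tail)
theorem pvMain (key : String) (tail : List String) (vs : List (Option String)) (out : List String) :
    (let s := vs.foldl (fun (s : List String × Nat) v => pvInnerA key s.1 s.2 (pvPairOf key v)) (out ++ tail, out.length)
     pvDelA key s.1 s.2)
      = out ++ pvScanB key tail vs := by
  induction tail generalizing vs out with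
  | nil =>
    simp only [List.append_nil]
    rw [pvFoldl_at_end]
    have := pvDelA_append key [] (out ++ vs.map (pvPairOf key))
    simp at this
    simp [this, pvScanB]
  | cons x xs ih =>
    by_cases hk : (pvKeyOf x == key) = true
    · cases vs with
      | nil =>
        simp only [List.foldl_nil]
        rw [pvDelA_append]
        simp [pvScanB, hk, pvScanB_nil]
      | cons v rest =>
        simp only [List.foldl_cons]
        rw [pvInnerA_hit key x xs out _ hk]
        have := ih rest (out ++ [pvPairOf key v])
        simp only at this
        rw [this]
        simp [pvScanB, hk]
    · cases vs with
      | nil =>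
        simp only [List.foldl_nil]
        rw [pvDelA_append]
        simp [pvScanB, hk, pvScanB_nil]
      | cons v rest =>
        simp only [List.foldl_cons]
        rw [pvInnerA_skip key x xs out _ hk]
        have := ih (v :: rest) (out ++ [x])
        simp only [List.foldl_cons] at this
        rw [this]
        simp [pvScanB, hk]

-- ===== VERDICT (by name: the statement is the Claim_ definition above) =====
theorem set_urlencoded_qs_values_spec : Claim_equal_set_urlencoded_qs_values := by
  intro query key values _
  unfold Spec_set_urlencoded_qs_values set_urlencoded_qs_values set_urlencoded_qs_values_alt
  have := pvMain key (if query = "" then [] else (PySem.Str.split? query "&").getD []) values []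
  simp only [List.nil_append, List.length_nil] at this
  simp only [this]
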